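-- pv_equiv track=rewrite | github.com/lin13k/practice | algo_problems/extra/gi_oa.py | fairPay
-- ===== SOURCE A (Python) =====
-- def fairPay(nums):
--     n = len(nums)
--     equalNum = sum(nums) // n
--     tmpNums = [i - equalNum for i in nums]
--     surpluses = {}
--     deficits = {}
--     for i, val in enumerate(tmpNums):
--         if val > 0:
--             if val in surpluses:
--                 surpluses[val].append(i)
--             else:
--                 surpluses[val] = [i]
--         if val < 0:
--             if val in deficits:
--                 deficits[val].append(i)
--             else:
--                 deficits[val] = [i]
--
--     def helper(surpluses, deficits, transactions):
--         if len(surpluses) == 0: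
--             return
--         for sur, indexes in surpluses.items():
--             # check if just match pair exist
--             if -sur in deficits:
--                 popNum = min(len(surpluses[sur]), len(deficits[-sur]))
--                 sources = None
--                 targets = None
--                 sources = surpluses[sur][:popNum]
--                 surpluses[sur] = surpluses[sur][popNum:]
--                 targets = deficits[-sur][:popNum]
--                 deficits[-sur] = deficits[-sur][popNum:]
--                 transactions.extend(
--                     list([sources[i], targets[i], sur]
--                          for i in range(len(sources))))
--         surpluses = {i: surpluses[i]
--                      for i in surpluses if len(surpluses[i]) > 0}
--         deficits = {i: deficits[i] for i in deficits if len(deficits[i]) > 0}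
--
--         if len(surpluses) == 0:
--             return
--
--         sur = max(surpluses.keys())
--         deficit = min(deficits.keys())
--
--         target = deficits[deficit].pop()
--         if len(deficits[deficit]) == 0:
--             deficits.pop(deficit)
--
--         source = surpluses[sur].pop()
--         if len(surpluses[sur]) == 0:
--             surpluses.pop(sur)
--
--         if sur > -deficit:
--             if sur + deficit in surpluses:
--                 surpluses[sur + deficit].append(source)
--             else:
--                 surpluses[sur + deficit] = [source]
--         else:
--             if sur + deficit in deficits:
--                 deficits[sur + deficit].append(target)
--             else:
--                 deficits[sur + deficit] = [target]
--         transactions.append([source, target, min(sur, -deficit)])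
--         return helper(surpluses, deficits, transactions)
--
--     transactions = []
--     helper(surpluses, deficits, transactions)
--     return transactions
-- ===== SOURCE B (Python) =====
-- def fairPay(nums):
--     n = len(nums)
--     mean = sum(nums) // n
--     surpluses = {}
--     deficits = {}
--     for i, v in enumerate(nums):
--         d = v - mean
--         if d > 0:
--             surpluses.setdefault(d, []).append(i)
--         elif d < 0:
--             deficits.setdefault(d, []).append(i)
--     transactions = []
--     while surpluses:
--         # batch phase: settle all exactly matching surplus/deficit pairs
--         for s in list(surpluses):
--             if -s in deficits:
--                 src, tgt = surpluses[s], deficits[-s]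
--                 k = min(len(src), len(tgt))
--                 transactions += [[a, b, s] for a, b in zip(src[:k], tgt[:k])]
--                 surpluses[s] = src[k:]
--                 deficits[-s] = tgt[k:]
--         surpluses = {k: v for k, v in surpluses.items() if v}
--         deficits = {k: v for k, v in deficits.items() if v}
--         if not surpluses:
--             break
--         # single partial transaction: largest surplus pays smallest deficit
--         s = max(surpluses)
--         d = min(deficits)
--         src = surpluses[s].pop()
--         tgt = deficits[d].pop()
--         if not surpluses[s]:
--             del surpluses[s]
--         if not deficits[d]:
--             del deficits[d]
--         r = s + d
--         if r > 0:
--             surpluses.setdefault(r, []).append(src)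
--         else:
--             deficits.setdefault(r, []).append(tgt)
--         transactions.append([src, tgt, min(s, -d)])
--     return transactions
-- ===== Notes on version B (the rewrite author's own statement) =====
-- stated objective: alternative
-- what changed: The tail-recursive helper becomes an explicit while-loop whose batch phase is a separate pass using zip over the matched slices, the dicts are built with setdefault/append instead of membership-tested branches, and the residual reinsertion uses setdefault instead of an in-test; the emitted transaction list is identical.
import Mathlib
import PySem

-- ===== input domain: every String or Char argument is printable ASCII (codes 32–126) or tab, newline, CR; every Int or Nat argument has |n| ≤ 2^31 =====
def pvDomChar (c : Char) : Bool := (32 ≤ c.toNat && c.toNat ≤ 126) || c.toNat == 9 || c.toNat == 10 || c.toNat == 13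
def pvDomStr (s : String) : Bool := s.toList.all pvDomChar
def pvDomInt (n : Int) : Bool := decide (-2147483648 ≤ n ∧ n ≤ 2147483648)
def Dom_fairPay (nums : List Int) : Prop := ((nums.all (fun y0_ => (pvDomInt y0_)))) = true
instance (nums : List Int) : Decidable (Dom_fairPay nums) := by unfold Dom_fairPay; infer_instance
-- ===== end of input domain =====

-- B rewrites A's tail-recursive helper as an explicit loop with a separate zip-based batch
-- pass and setdefault-style dict updates (objective: alternative decomposition, same cost);
-- the returned transaction list is identical on Pre_.

-- ===== PORT A =====
-- one iteration of A's `for sur, indexes in surpluses.items()` loop (the fold runs it over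
-- the snapshot of the keys; only values are mutated, so the snapshot is exact)
def fairPayPairStep (st : PySem.Dict Int (List Int) × PySem.Dict Int (List Int) × List (List Int))
    (sur : Int) : PySem.Dict Int (List Int) × PySem.Dict Int (List Int) × List (List Int) :=
  match st.2.1.get? (-sur) with          -- `if -sur in deficits`
  | none => st
  | some dl =>
      let sl := st.1.getD sur []
      let popNum := min sl.length dl.length
      let sources := sl.take popNum
      let S := st.1.insert sur (sl.drop popNum)
      let targets := dl.take popNum
      let D := st.2.1.insert (-sur) (dl.drop popNum)
      (S, D, st.2.2 ++ (List.range sources.length).map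
        (fun i => [sources.getD i 0, targets.getD i 0, sur]))

-- A's recursive `helper`; fuel only bounds the recursion depth (each recursive call strictly
-- decreases the total number of stored indices, so `nums.length + 1` is never exhausted on an
-- input where the Python returns).  `list.pop()` is ported exactly as last element + dropLast;
-- the `none`/`| _, _ =>` fallbacks are Python's IndexError/ValueError points (outside Pre_).
def fairPayHelper : Nat → PySem.Dict Int (List Int) → PySem.Dict Int (List Int) →
    List (List Int) → List (List Int)
  | 0, _, _, tr => tr
  | fuel + 1, S0, D0, tr0 =>
    if S0.size = 0 then tr0 else
    let st := S0.keys.foldl fairPayPairStep (S0, D0, tr0)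
    let S1 : PySem.Dict Int (List Int) := PySem.Dict.mk (st.1.items.filter (fun p => decide (0 < p.2.length)))
    let D1 : PySem.Dict Int (List Int) := PySem.Dict.mk (st.2.1.items.filter (fun p => decide (0 < p.2.length)))
    let tr1 := st.2.2
    if S1.size = 0 then tr1 else
    match PySem.List.max? S1.keys (fun x => x), PySem.List.min? D1.keys (fun x => x) with
    | some sur, some deficit =>
      match (D1.getD deficit []).getLast? with
      | none => tr1
      | some target =>
        let D2a := D1.insert deficit ((D1.getD deficit []).dropLast)
        let D2 := if (D2a.getD deficit []).length = 0 then D2a.erase deficit else D2a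
        match (S1.getD sur []).getLast? with
        | none => tr1
        | some source =>
          let S2a := S1.insert sur ((S1.getD sur []).dropLast)
          let S2 := if (S2a.getD sur []).length = 0 then S2a.erase sur else S2a
          let SD :=
            if sur > -deficit then
              (match S2.get? (sur + deficit) with
               | some l => S2.insert (sur + deficit) (l ++ [source])
               | none => S2.insert (sur + deficit) [source], D2)
            else
              (S2,
               match D2.get? (sur + deficit) with
               | some l => D2.insert (sur + deficit) (l ++ [target])
               | none => D2.insert (sur + deficit) [target])
          fairPayHelper fuel SD.1 SD.2 (tr1 ++ [[source, target, min sur (-deficit)]])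
    | _, _ => tr1

def fairPay (nums : List Int) : List (List Int) :=
  let n : Int := (nums.length : Int)
  let equalNum := PySem.Int.floordiv nums.sum n
  let tmpNums := nums.map (fun i => i - equalNum)
  let sd := (PySem.List.enumerate tmpNums 0).foldl
    (fun (sd : PySem.Dict Int (List Int) × PySem.Dict Int (List Int)) p =>
      let s1 := if p.2 > 0 then
          (if sd.1.contains p.2 then sd.1.insert p.2 (sd.1.getD p.2 [] ++ [p.1])
           else sd.1.insert p.2 [p.1]) else sd.1
      let d1 := if p.2 < 0 then
          (if sd.2.contains p.2 then sd.2.insert p.2 (sd.2.getD p.2 [] ++ [p.1])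
           else sd.2.insert p.2 [p.1]) else sd.2
      (s1, d1))
    (PySem.Dict.empty, PySem.Dict.empty)
  fairPayHelper (nums.length + 1) sd.1 sd.2 []

-- ===== PORT B =====
-- batch phase: a structural pass over the key snapshot settling exact matches with zip
def fairPayBatch : List Int → PySem.Dict Int (List Int) → PySem.Dict Int (List Int) →
    List (List Int) → PySem.Dict Int (List Int) × PySem.Dict Int (List Int) × List (List Int)
  | [], S, D, tr => (S, D, tr)
  | s :: rest, S, D, tr =>
    if D.contains (-s) then
      let src := S.getD s []
      let tgt := D.getD (-s) []
      let k := min src.length tgt.length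
      fairPayBatch rest (S.insert s (src.drop k)) (D.insert (-s) (tgt.drop k))
        (tr ++ ((src.take k).zip (tgt.take k)).map (fun p => [p.1, p.2, s]))
    else fairPayBatch rest S D tr

-- B's `while surpluses:` loop; fuel bounds the iteration count exactly as in A's port.
def fairPayLoop : Nat → PySem.Dict Int (List Int) → PySem.Dict Int (List Int) →
    List (List Int) → List (List Int)
  | 0, _, _, tr => tr
  | fuel + 1, S, D, tr =>
    if S.size = 0 then tr else
    let st := fairPayBatch S.keys S D tr
    let S1 : PySem.Dict Int (List Int) := PySem.Dict.mk (st.1.items.filter (fun p => !p.2.isEmpty))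
    let D1 : PySem.Dict Int (List Int) := PySem.Dict.mk (st.2.1.items.filter (fun p => !p.2.isEmpty))
    if S1.size = 0 then st.2.2 else
    match PySem.List.max? S1.keys (fun x => x), PySem.List.min? D1.keys (fun x => x) with
    | some s, some d =>
      match (S1.getD s []).getLast?, (D1.getD d []).getLast? with
      | some src, some tgt =>
        let sl := (S1.getD s []).dropLast
        let dl := (D1.getD d []).dropLast
        let S2 := if sl.isEmpty then (S1.insert s sl).erase s else S1.insert s sl
        let D2 := if dl.isEmpty then (D1.insert d dl).erase d else D1.insert d dl
        let r := s + d
        let S3 := if r > 0 then S2.modify r [] (· ++ [src]) else S2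
        let D3 := if r > 0 then D2 else D2.modify r [] (· ++ [tgt])
        fairPayLoop fuel S3 D3 (st.2.2 ++ [[src, tgt, min s (-d)]])
      | _, _ => st.2.2
    | _, _ => st.2.2

def fairPay_alt (nums : List Int) : List (List Int) :=
  let mean := PySem.Int.floordiv nums.sum (nums.length : Int)
  let sd := (PySem.List.enumerate nums 0).foldl
    (fun (sd : PySem.Dict Int (List Int) × PySem.Dict Int (List Int)) p =>
      let dv := p.2 - mean
      if dv > 0 then (sd.1.modify dv [] (· ++ [p.1]), sd.2)
      else if dv < 0 then (sd.1, sd.2.modify dv [] (· ++ [p.1]))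
      else sd)
    (PySem.Dict.empty, PySem.Dict.empty)
  fairPayLoop (nums.length + 1) sd.1 sd.2 []

-- ===== PRECONDITION & SPEC =====
-- Pre_ excludes exactly the inputs where A raises: the empty list (ZeroDivisionError) and
-- lists whose sum is not divisible by the length (the surpluses then outweigh the deficits
-- and A's `min(deficits.keys())` eventually hits an empty dict: ValueError).
def Pre_fairPay (nums : List Int) : Prop :=
  nums ≠ [] ∧ PySem.Int.mod nums.sum (nums.length : Int) = 0
instance (nums : List Int) : Decidable (Pre_fairPay nums) := by unfold Pre_fairPay; infer_instance

def pvWitness_fairPay : List Int := [3, 0, 0]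

def Spec_fairPay (nums : List Int) (out : List (List Int)) : Prop := out = fairPay_alt nums
instance (nums : List Int) (out : List (List Int)) : Decidable (Spec_fairPay nums out) := by unfold Spec_fairPay; infer_instance

-- ===== CLAIM (what is proved, stated in full; the proofs are below) =====
def Claim_equal_fairPay : Prop := ∀ (nums : List Int), Dom_fairPay nums → Pre_fairPay nums → Spec_fairPay nums (fairPay nums)

-- ===== LEMMAS AND PROOFS =====

-- A's index-comprehension over range equals B's zip-comprehension when the slices match in length
theorem fp_range_map_eq_zip (xs : List Int) (s : Int) :
    ∀ ys : List Int, xs.length = ys.length →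
    (List.range xs.length).map (fun i => [xs.getD i 0, ys.getD i 0, s]) =
      (xs.zip ys).map (fun p => [p.1, p.2, s]) := by
  induction xs with
  | nil => intro ys h; simp
  | cons x xt ih =>
    intro ys h
    cases ys with
    | nil => simp at h
    | cons y yt =>
      simp only [List.length_cons, List.range_succ_eq_map, List.map_cons, List.map_map,
        List.zip_cons_cons]
      congr 1
      simpa using ih yt (by simpa using h)

-- membership-tested insert-or-append equals Python's setdefault(...).append (= Dict.modify)
theorem fp_insert_append_eq_modify (d : PySem.Dict Int (List Int)) (k x : Int) :
    (if d.contains k then d.insert k (d.getD k [] ++ [x]) else d.insert k [x]) =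
      d.modify k [] (· ++ [x]) := by
  simp only [PySem.Dict.modify, PySem.Dict.getD_eq_get?_getD,
    PySem.Dict.contains_eq_isSome_get?]
  cases d.get? k <;> simp

-- A's match-on-get? residual reinsertion, in the same form
theorem fp_residual (d : PySem.Dict Int (List Int)) (k x : Int) :
    (match d.get? k with
     | some l => d.insert k (l ++ [x])
     | none => d.insert k [x]) = d.modify k [] (· ++ [x]) := by
  rw [← fp_insert_append_eq_modify, PySem.Dict.contains_eq_isSome_get?]
  cases h : d.get? k with
  | none => rfl
  | some l =>
    have : d.getD k [] = l := by rw [PySem.Dict.getD_eq_get?_getD, h]; rfl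
    simp [this]

-- A's pop-then-drop-empty-key update equals B's form of the same update
theorem fp_popfix (d : PySem.Dict Int (List Int)) (k : Int) (l : List Int) :
    (if ((d.insert k l).getD k []).length = 0 then (d.insert k l).erase k else d.insert k l) =
      (if l.isEmpty then (d.insert k l).erase k else d.insert k l) := by
  rw [PySem.Dict.getD_insert_self]
  by_cases h : l = [] <;> simp [h, List.isEmpty_iff, List.length_eq_zero_iff]

-- one iteration of A's pair loop, written as B's batch step
theorem fp_step_eq (S D : PySem.Dict Int (List Int)) (tr : List (List Int)) (s : Int) :
    fairPayPairStep (S, D, tr) s =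
      (if D.contains (-s) then
        (S.insert s ((S.getD s []).drop (min (S.getD s []).length (D.getD (-s) []).length)),
         D.insert (-s) ((D.getD (-s) []).drop (min (S.getD s []).length (D.getD (-s) []).length)),
         tr ++ (((S.getD s []).take (min (S.getD s []).length (D.getD (-s) []).length)).zip
                  ((D.getD (-s) []).take (min (S.getD s []).length (D.getD (-s) []).length))).map
                 (fun p => [p.1, p.2, s]))
       else (S, D, tr)) := by
  rw [PySem.Dict.contains_eq_isSome_get?]
  unfold fairPayPairStep
  cases h : D.get? (-s) with
  | none => rfl
  | some dl =>
    have hgd : D.getD (-s) [] = dl := by rw [PySem.Dict.getD_eq_get?_getD, h]; rfl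
    simp only [Option.isSome_some, if_true, hgd]
    refine congrArg (Prod.mk _) (congrArg (Prod.mk _) (congrArg (tr ++ ·) ?_))
    exact fp_range_map_eq_zip _ s _ (by simp)

-- A's pair-phase fold equals B's batch recursion
theorem fp_pair_eq_batch (keys : List Int) :
    ∀ (S D : PySem.Dict Int (List Int)) (tr : List (List Int)),
    keys.foldl fairPayPairStep (S, D, tr) = fairPayBatch keys S D tr := by
  induction keys with
  | nil => intro S D tr; rfl
  | cons s rest ih =>
    intro S D tr
    simp only [List.foldl_cons, fp_step_eq, fairPayBatch]
    by_cases h : D.contains (-s)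
    · rw [if_pos h, if_pos h, ih]
    · rw [if_neg h, if_neg h, ih]

-- the two value-nonempty dict comprehensions use equal predicates
theorem fp_filter_pred_eq (l : List (Int × List Int)) :
    l.filter (fun p => decide (0 < p.2.length)) = l.filter (fun p => !p.2.isEmpty) := by
  apply List.filter_congr
  intro p _
  cases p.2 <;> simp

-- the recursion/loop bodies agree step for step
theorem fp_helper_eq_loop :
    ∀ (fuel : Nat) (S D : PySem.Dict Int (List Int)) (tr : List (List Int)),
    fairPayHelper fuel S D tr = fairPayLoop fuel S D tr := by
  intro fuel
  induction fuel with
  | zero => intro S D tr; rfl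
  | succ n ih =>
    intro S D tr
    rw [fairPayHelper, fairPayLoop]
    by_cases h0 : S.size = 0
    · simp only [h0, if_true]
    · simp only [h0, if_false]
      rw [fp_pair_eq_batch]
      generalize fairPayBatch S.keys S D tr = st
      obtain ⟨SA, DA, trA⟩ := st
      simp only [fp_filter_pred_eq]
      generalize (PySem.Dict.mk (SA.items.filter (fun p => !p.2.isEmpty)) : PySem.Dict Int (List Int)) = S1
      generalize (PySem.Dict.mk (DA.items.filter (fun p => !p.2.isEmpty)) : PySem.Dict Int (List Int)) = D1
      by_cases h1 : S1.size = 0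
      · simp only [h1, if_true]
      · simp only [h1, if_false]
        cases PySem.List.max? S1.keys (fun x => x) with
        | none => rfl
        | some sur =>
          cases PySem.List.min? D1.keys (fun x => x) with
          | none => rfl
          | some deficit =>
            dsimp only
            cases hS : (S1.getD sur []).getLast? with
            | none => cases hD : (D1.getD deficit []).getLast? <;> rfl
            | some src =>
              cases hD : (D1.getD deficit []).getLast? with
              | none => rfl
              | some tgt =>
                dsimp only
                rw [ih, fp_popfix, fp_popfix]
                by_cases hc : sur > -deficit
                · simp only [if_pos hc, if_pos (show sur + deficit > 0 by omega), fp_residual]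
                · simp only [if_neg hc, if_neg (show ¬ sur + deficit > 0 by omega), fp_residual]

-- enumerate of a mapped list
theorem fp_enumerate_map (f : Int → Int) (xs : List Int) :
    ∀ s : Int, PySem.List.enumerate (xs.map f) s =
      (PySem.List.enumerate xs s).map (fun p => (p.1, f p.2)) := by
  induction xs with
  | nil => intro s; simp [PySem.List.enumerate_nil]
  | cons x xt ih => intro s; simp [PySem.List.enumerate_cons, ih]

-- the two build-up folds produce the same pair of dicts
theorem fp_build_eq (nums : List Int) (mean : Int) :
    (PySem.List.enumerate (nums.map (fun i => i - mean)) 0).foldl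
      (fun (sd : PySem.Dict Int (List Int) × PySem.Dict Int (List Int)) p =>
        let s1 := if p.2 > 0 then
            (if sd.1.contains p.2 then sd.1.insert p.2 (sd.1.getD p.2 [] ++ [p.1])
             else sd.1.insert p.2 [p.1]) else sd.1
        let d1 := if p.2 < 0 then
            (if sd.2.contains p.2 then sd.2.insert p.2 (sd.2.getD p.2 [] ++ [p.1])
             else sd.2.insert p.2 [p.1]) else sd.2
        (s1, d1))
      (PySem.Dict.empty, PySem.Dict.empty) =
    (PySem.List.enumerate nums 0).foldl
      (fun (sd : PySem.Dict Int (List Int) × PySem.Dict Int (List Int)) p =>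
        let dv := p.2 - mean
        if dv > 0 then (sd.1.modify dv [] (· ++ [p.1]), sd.2)
        else if dv < 0 then (sd.1, sd.2.modify dv [] (· ++ [p.1]))
        else sd)
      (PySem.Dict.empty, PySem.Dict.empty) := by
  rw [fp_enumerate_map, List.foldl_map]
  apply PySem.List.foldl_congr_mem
  intro sd p _
  dsimp only
  by_cases hp : p.2 - mean > 0
  · rw [if_pos hp, if_pos hp, if_neg (show ¬ p.2 - mean < 0 by omega),
      fp_insert_append_eq_modify]
  · rw [if_neg hp, if_neg hp]
    by_cases hn : p.2 - mean < 0
    · rw [if_pos hn, if_pos hn, fp_insert_append_eq_modify]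
    · rw [if_neg hn, if_neg hn]

-- ===== VERDICT (by name: the statement is the Claim_ definition above) =====
theorem fairPay_spec : Claim_equal_fairPay := by
  intro nums _ _
  unfold Spec_fairPay fairPay fairPay_alt
  dsimp only
  rw [fp_build_eq, fp_helper_eq_loop]
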